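-- pv_equiv track=rewrite | github.com/margvelinho/Task-Nav-Final | app.py | fallback_text_parsing
-- ===== SOURCE A (Python) =====
-- def fallback_text_parsing(text):
--     """Fallback parser for unstructured AI responses"""
--     periods = {}
--     lines = [line.strip() for line in text.split('\n') if line.strip()]
--
--     if not lines:
--         return periods
--
--     chunks = []
--     current_chunk = []
--
--     for line in lines:
--         if any(keyword in line.lower() for keyword in ['week', 'month', 'day', 'phase', 'step', 'period', 'stage']):
--             if current_chunk:
--                 chunks.append('\n'.join(current_chunk))
--                 current_chunk = []
--         current_chunk.append(line)
--
--     if current_chunk: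
--         chunks.append('\n'.join(current_chunk))
--
--     if len(chunks) < 2:
--         chunk_size = max(1, len(lines) // 3)
--         chunks = []
--         for i in range(0, len(lines), chunk_size):
--             chunk_lines = lines[i:i+chunk_size]
--             if chunk_lines:
--                 chunks.append('\n'.join(chunk_lines))
--
--     for i, chunk in enumerate(chunks[:10]):
--         period_num = i + 1
--         tasks = []
--         sentences = [s.strip() for s in chunk.replace('\n', '. ').split('.') if s.strip() and len(s.strip()) > 10]
--
--         for sentence in sentences[:3]:
--             if len(sentence) > 20:
--                 tasks.append(sentence)
--
--         if not tasks and chunk: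
--             tasks = [chunk[:200] + '...' if len(chunk) > 200 else chunk]
--
--         if tasks:
--             periods[period_num] = tasks
--
--     return periods
-- ===== SOURCE B (Python) =====
-- KEYWORDS = ['week', 'month', 'day', 'phase', 'step', 'period', 'stage']
--
--
-- def _has_kw(line):
--     low = line.lower()
--     return any(k in low for k in KEYWORDS)
--
--
-- def _split_chunks(lines):
--     """Two-pointer scan: a chunk runs from its start line to just before the next keyword line."""
--     chunks = []
--     i = 0
--     n = len(lines)
--     while i < n:
--         j = i + 1
--         while j < n and not _has_kw(lines[j]):
--             j += 1
--         chunks.append('\n'.join(lines[i:j]))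
--         i = j
--     return chunks
--
--
-- def _tasks_for(chunk):
--     """Single fused pass over the sentence parts with a countdown instead of intermediate lists."""
--     tasks = []
--     remaining = 3
--     for part in chunk.replace('\n', '. ').split('.'):
--         if remaining == 0:
--             break
--         s = part.strip()
--         if len(s) > 10:
--             remaining -= 1
--             if len(s) > 20:
--                 tasks.append(s)
--     if not tasks and chunk:
--         tasks = [chunk[:200] + '...' if len(chunk) > 200 else chunk]
--     return tasks
--
--
-- def fallback_text_parsing(text):
--     lines = [line.strip() for line in text.split('\n') if line.strip()]
--     if not lines:
--         return {}
--     chunks = _split_chunks(lines)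
--     if len(chunks) < 2:
--         chunk_size = max(1, len(lines) // 3)
--         chunks = ['\n'.join(lines[i:i + chunk_size])
--                   for i in range(0, len(lines), chunk_size) if lines[i:i + chunk_size]]
--     return {i + 1: t for i, chunk in enumerate(chunks[:10]) if (t := _tasks_for(chunk))}
-- ===== Notes on version B (the rewrite author's own statement) =====
-- stated objective: alternative
-- what changed: Replaces A's accumulate-and-flush chunking buffer with a two-pointer boundary scan that slices lines directly between keyword lines, fuses A's three-stage sentence pipeline (filter list, [:3], second filter) into a single countdown pass with no intermediate lists, and builds the period dict by comprehension instead of a mutating loop.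
import Mathlib
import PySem

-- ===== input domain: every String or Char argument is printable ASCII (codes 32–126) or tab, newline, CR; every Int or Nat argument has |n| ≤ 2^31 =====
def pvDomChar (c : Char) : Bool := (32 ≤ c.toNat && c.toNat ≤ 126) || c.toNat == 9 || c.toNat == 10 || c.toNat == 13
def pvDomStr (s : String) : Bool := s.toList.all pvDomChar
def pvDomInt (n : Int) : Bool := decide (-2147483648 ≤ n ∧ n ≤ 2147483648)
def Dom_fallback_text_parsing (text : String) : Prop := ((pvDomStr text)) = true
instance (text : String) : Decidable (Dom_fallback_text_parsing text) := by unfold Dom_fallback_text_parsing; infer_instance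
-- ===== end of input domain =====

-- B replaces A's accumulate-and-flush chunking with a two-pointer boundary scan, fuses the
-- three-stage sentence pipeline into one countdown pass, and builds the dict by comprehension;
-- same cost, alternative structure.


-- ===== PORT A =====
-- shared vocabulary: the keyword test `any(keyword in line.lower() for keyword in [...])`,
-- identical in both Pythons
def pvKeywords : List String := ["week", "month", "day", "phase", "step", "period", "stage"]

def pvHasKw (line : String) : Bool :=
  pvKeywords.any (fun k => PySem.Str.isIn k (PySem.Str.lower line))

-- shared: `[line.strip() for line in text.split('\n') if line.strip()]`, identical in both Pythons
def pvLines (text : String) : List String :=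
  ((((PySem.Str.split? text "\n").getD [])).map PySem.Str.strip).filter (fun l => l != "")

-- A's loop body: flush current_chunk on a keyword line, then append the line
def pvChunkStep (st : List String × List String) (line : String) : List String × List String :=
  let st := if pvHasKw line then
      (if st.2.isEmpty then st else (st.1 ++ [PySem.Str.join "\n" st.2], ([] : List String)))
    else st
  (st.1, st.2 ++ [line])

-- A: sentences = [s.strip() for s in chunk.replace('\n','. ').split('.') if s.strip() and len(s.strip()) > 10]
def pvSentences (chunk : String) : List String :=
  ((((PySem.Str.split? (PySem.Str.replace chunk "\n" ". ") ".").getD [])).map PySem.Str.strip).filter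
    (fun s => (s != "") && decide (10 < PySem.Str.len s))

-- A's per-chunk task extraction (sentences list, [:3], length filter, default)
def pvTasksA (chunk : String) : List String :=
  let tasks := (PySem.List.slice (pvSentences chunk) none (some 3)).foldl
    (fun tasks sentence => if decide (20 < PySem.Str.len sentence) then tasks ++ [sentence] else tasks) []
  if tasks.isEmpty && chunk != "" then
    [if decide (200 < PySem.Str.len chunk) then PySem.Str.slice chunk none (some 200) ++ "..." else chunk]
  else tasks

-- the first chunking phase: the flush loop plus the trailing flush
def pvChunksPhaseA (lines : List String) : List String :=
  let st := lines.foldl pvChunkStep ([], [])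
  if st.2.isEmpty then st.1 else st.1 ++ [PySem.Str.join "\n" st.2]

-- re-chunking fallback: `for i in range(0, len(lines), chunk_size): ... chunks.append(...)`
def pvFallbackChunksA (lines : List String) : List String :=
  let chunk_size : Int := max 1 (PySem.Int.floordiv (PySem.List.len lines) 3)
  (PySem.List.pyRange 0 (PySem.List.len lines) chunk_size).foldl (fun cs i =>
    let chunk_lines := PySem.List.slice lines (some i) (some (i + chunk_size))
    if !chunk_lines.isEmpty then cs ++ [PySem.Str.join "\n" chunk_lines] else cs) []

-- `for i, chunk in enumerate(chunks[:10]): ... periods[period_num] = tasks`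
def pvPeriodsA (chunks : List String) : List (Int × List String) :=
  ((PySem.List.enumerate (PySem.List.slice chunks none (some 10)) 0).foldl
    (fun (periods : PySem.Dict Int (List String)) p =>
      let tasks := pvTasksA p.2
      if !tasks.isEmpty then periods.insert (p.1 + 1) tasks else periods)
    PySem.Dict.empty).items

def fallback_text_parsing (text : String) : List (Int × List String) :=
  let lines := pvLines text
  if lines.isEmpty then [] else
  let chunks := pvChunksPhaseA lines
  let chunks := if chunks.length < 2 then pvFallbackChunksA lines else chunks
  pvPeriodsA chunks

-- ===== PORT B =====
-- inner `while j < n and not _has_kw(lines[j]): j += 1`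
def pvInnerScan (lines : List String) (j : Nat) : Nat :=
  if h : j < lines.length then
    if pvHasKw lines[j] then j else pvInnerScan lines (j + 1)
  else j
termination_by lines.length - j

-- cited by pvSplitChunks's decreasing_by
theorem le_pvInnerScan (lines : List String) (j : Nat) : j ≤ pvInnerScan lines j := by
  unfold pvInnerScan
  split
  · split
    · exact Nat.le_refl j
    · exact Nat.le_trans (Nat.le_succ j) (le_pvInnerScan lines (j + 1))
  · exact Nat.le_refl j
termination_by lines.length - j

-- outer while of _split_chunks; lines[i:j] with 0 ≤ i ≤ j is (drop i).take (j - i)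
-- (exact by PySem.List.slice_toNat)
def pvSplitChunks (lines : List String) (i : Nat) : List String :=
  if h : i < lines.length then
    let j := pvInnerScan lines (i + 1)
    PySem.Str.join "\n" ((lines.drop i).take (j - i)) :: pvSplitChunks lines j
  else []
termination_by lines.length - i
decreasing_by
  have := le_pvInnerScan lines (i + 1)
  omega

-- _tasks_for's fused loop with the `remaining` countdown and break
def pvTaskLoop (parts : List String) (tasks : List String) (remaining : Nat) : List String :=
  match parts with
  | [] => tasks
  | part :: ps =>
    if remaining = 0 then tasks
    else
      let s := PySem.Str.strip part
      if decide (10 < PySem.Str.len s) then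
        pvTaskLoop ps (tasks ++ if decide (20 < PySem.Str.len s) then [s] else []) (remaining - 1)
      else pvTaskLoop ps tasks remaining

def pvTasksFor (chunk : String) : List String :=
  let tasks := pvTaskLoop (((PySem.Str.split? (PySem.Str.replace chunk "\n" ". ") ".").getD [])) [] 3
  if tasks.isEmpty && chunk != "" then
    [if decide (200 < PySem.Str.len chunk) then PySem.Str.slice chunk none (some 200) ++ "..." else chunk]
  else tasks

-- B's fallback comprehension `['\n'.join(lines[i:i+k]) for i in range(0,len,k) if lines[i:i+k]]`
def pvFallbackChunksB (lines : List String) : List String :=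
  let chunk_size : Int := max 1 (PySem.Int.floordiv (PySem.List.len lines) 3)
  (PySem.List.pyRange 0 (PySem.List.len lines) chunk_size).filterMap (fun i =>
    let chunk_lines := PySem.List.slice lines (some i) (some (i + chunk_size))
    if chunk_lines.isEmpty then none else some (PySem.Str.join "\n" chunk_lines))

-- B's dict comprehension `{i + 1: t for i, chunk in enumerate(chunks[:10]) if (t := _tasks_for(chunk))}`
def pvPeriodsB (chunks : List String) : List (Int × List String) :=
  ((PySem.List.enumerate (PySem.List.slice chunks none (some 10)) 0).foldl
    (fun (periods : PySem.Dict Int (List String)) p =>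
      let t := pvTasksFor p.2
      if t.isEmpty then periods else periods.insert (p.1 + 1) t)
    PySem.Dict.empty).items

def fallback_text_parsing_alt (text : String) : List (Int × List String) :=
  let lines := pvLines text
  if lines.isEmpty then [] else
  let chunks := pvSplitChunks lines 0
  let chunks := if chunks.length < 2 then pvFallbackChunksB lines else chunks
  pvPeriodsB chunks

-- ===== PRECONDITION & SPEC =====
def Spec_fallback_text_parsing (text : String) (out : List (Int × List String)) : Prop := out = fallback_text_parsing_alt text
instance (text : String) (out : List (Int × List String)) : Decidable (Spec_fallback_text_parsing text out) := by unfold Spec_fallback_text_parsing; infer_instance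

-- ===== CLAIM (what is proved, stated in full; the proofs are below) =====
def Claim_equal_fallback_text_parsing : Prop := ∀ (text : String), Dom_fallback_text_parsing text → Spec_fallback_text_parsing text (fallback_text_parsing text)

-- ===== LEMMAS AND PROOFS =====


-- the common recursive shape of both chunking phases: a chunk is its first line plus the
-- following non-keyword lines
def pvSpecChunks (ls : List String) : List String :=
  match ls with
  | [] => []
  | l :: ls' =>
    PySem.Str.join "\n" (l :: ls'.takeWhile (fun x => !pvHasKw x)) ::
      pvSpecChunks (ls'.dropWhile (fun x => !pvHasKw x))
termination_by ls.length
decreasing_by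
  simpa using Nat.lt_succ_of_le (List.length_dropWhile_le _ _)

theorem pv_take_length_takeWhile {α : Type} (p : α → Bool) (l : List α) :
    l.take (l.takeWhile p).length = l.takeWhile p := by
  induction l with
  | nil => simp
  | cons a l ih => by_cases h : p a <;> simp [h, ih]

theorem pv_drop_length_takeWhile {α : Type} (p : α → Bool) (l : List α) :
    l.drop (l.takeWhile p).length = l.dropWhile p := by
  induction l with
  | nil => simp
  | cons a l ih => by_cases h : p a <;> simp [h, ih]

theorem pv_chunk_inv (ls : List String) : ∀ (chunks cur : List String), cur ≠ [] →
    (if (ls.foldl pvChunkStep (chunks, cur)).2.isEmpty then (ls.foldl pvChunkStep (chunks, cur)).1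
     else (ls.foldl pvChunkStep (chunks, cur)).1 ++
       [PySem.Str.join "\n" (ls.foldl pvChunkStep (chunks, cur)).2])
    = chunks ++ PySem.Str.join "\n" (cur ++ ls.takeWhile (fun x => !pvHasKw x)) ::
        pvSpecChunks (ls.dropWhile (fun x => !pvHasKw x)) := by
  induction ls with
  | nil =>
    intro chunks cur hcur
    simp [List.isEmpty_iff, hcur, pvSpecChunks]
  | cons l ls ih =>
    intro chunks cur hcur
    by_cases hk : pvHasKw l
    · have hstep : pvChunkStep (chunks, cur) l
          = (chunks ++ [PySem.Str.join "\n" cur], [l]) := by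
        simp [pvChunkStep, hk, List.isEmpty_iff, hcur]
      rw [List.foldl_cons, hstep, ih _ [l] (by simp)]
      simp [pvSpecChunks, hk]
    · have hstep : pvChunkStep (chunks, cur) l = (chunks, cur ++ [l]) := by
        simp [pvChunkStep, hk]
      rw [List.foldl_cons, hstep, ih _ (cur ++ [l]) (by simp)]
      simp [hk]

theorem pv_chunkA_eq (lines : List String) :
    pvChunksPhaseA lines = pvSpecChunks lines := by
  show (if (lines.foldl pvChunkStep ([], [])).2.isEmpty then (lines.foldl pvChunkStep ([], [])).1
     else (lines.foldl pvChunkStep ([], [])).1 ++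
       [PySem.Str.join "\n" (lines.foldl pvChunkStep ([], [])).2])
    = pvSpecChunks lines
  cases lines with
  | nil => simp [pvSpecChunks]
  | cons l ls =>
    have hstep : pvChunkStep ([], []) l = ([], [l]) := by
      simp [pvChunkStep]
    rw [List.foldl_cons, hstep, pv_chunk_inv ls [] [l] (by simp)]
    simp [pvSpecChunks]

theorem pv_innerScan_eq (lines : List String) (k : Nat) : ∀ (j : Nat), lines.length - j ≤ k →
    pvInnerScan lines j = j + ((lines.drop j).takeWhile (fun x => !pvHasKw x)).length := by
  induction k with
  | zero =>
    intro j hj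
    have hge : lines.length ≤ j := by omega
    rw [pvInnerScan]
    simp [Nat.not_lt.mpr hge, List.drop_eq_nil_of_le hge]
  | succ k ih =>
    intro j hj
    rw [pvInnerScan]
    by_cases h : j < lines.length
    · rw [List.drop_eq_getElem_cons h]
      by_cases hk : pvHasKw lines[j]
      · simp [h, hk]
      · simp only [h, dif_pos, hk, if_false, List.takeWhile_cons, Bool.not_eq_true']
        rw [ih (j + 1) (by omega)]
        simp [hk]
        omega
    · simp [h, List.drop_eq_nil_of_le (Nat.not_lt.mp h)]

theorem pv_split_eq (lines : List String) (k : Nat) : ∀ (i : Nat), lines.length - i ≤ k →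
    pvSplitChunks lines i = pvSpecChunks (lines.drop i) := by
  induction k with
  | zero =>
    intro i hi
    have hge : lines.length ≤ i := by omega
    rw [pvSplitChunks]
    simp [Nat.not_lt.mpr hge, List.drop_eq_nil_of_le hge, pvSpecChunks]
  | succ k ih =>
    intro i hi
    rw [pvSplitChunks]
    by_cases h : i < lines.length
    · simp only [h, dif_pos]
      have hscan := pv_innerScan_eq lines (lines.length - (i + 1)) (i + 1) (Nat.le_refl _)
      set t := ((lines.drop (i + 1)).takeWhile (fun x => !pvHasKw x)).length with ht
      have hdropi : lines.drop i = lines[i] :: lines.drop (i + 1) := List.drop_eq_getElem_cons h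
      have htake : (lines.drop i).take (pvInnerScan lines (i + 1) - i)
          = lines[i] :: (lines.drop (i + 1)).takeWhile (fun x => !pvHasKw x) := by
        rw [hscan, hdropi]
        have : i + 1 + t - i = t + 1 := by omega
        rw [this, List.take_succ_cons, pv_take_length_takeWhile]
      have hdropj : lines.drop (pvInnerScan lines (i + 1))
          = (lines.drop (i + 1)).dropWhile (fun x => !pvHasKw x) := by
        rw [hscan, ← List.drop_drop, pv_drop_length_takeWhile]
      rw [htake, ih (pvInnerScan lines (i + 1)) (by rw [hscan]; omega), hdropj]
      rw [hdropi]
      conv_rhs => rw [pvSpecChunks]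
    · simp [h, List.drop_eq_nil_of_le (Nat.not_lt.mp h), pvSpecChunks]

-- B's first chunking phase agrees with A's
theorem pv_chunks_eq (lines : List String) :
    pvChunksPhaseA lines = pvSplitChunks lines 0 := by
  rw [pv_chunkA_eq, pv_split_eq lines lines.length 0 (by omega), List.drop_zero]

-- A's append-if fold over the fallback range is B's filterMap
theorem pv_foldl_appendif_filterMap {α β : Type} (e : α → Bool) (v : α → β) (r : List α) :
    ∀ (acc : List β),
    r.foldl (fun acc i => if !(e i) then acc ++ [v i] else acc) acc
    = acc ++ r.filterMap (fun i => if e i then none else some (v i)) := by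
  induction r with
  | nil => simp
  | cons a r ih =>
    intro acc
    by_cases he : e a
    · rw [List.foldl_cons, if_neg (by simp [he]), ih]
      simp [he]
    · rw [List.foldl_cons, if_pos (by simp [he]), ih]
      simp [he]

theorem pv_fallback_eq (lines : List String) :
    pvFallbackChunksA lines = pvFallbackChunksB lines := by
  refine Eq.trans (pv_foldl_appendif_filterMap
    (fun i => (PySem.List.slice lines (some i)
        (some (i + max 1 (PySem.Int.floordiv (PySem.List.len lines) 3)))).isEmpty)
    (fun i => PySem.Str.join "\n" (PySem.List.slice lines (some i)
        (some (i + max 1 (PySem.Int.floordiv (PySem.List.len lines) 3)))))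
    (PySem.List.pyRange 0 (PySem.List.len lines)
      (max 1 (PySem.Int.floordiv (PySem.List.len lines) 3))) []) ?_
  exact List.nil_append _

theorem pv_taskLoop_eq (ps : List String) : ∀ (tasks : List String) (r : Nat),
    pvTaskLoop ps tasks r
    = tasks ++ ((((ps.map PySem.Str.strip).filter
          (fun s => decide (10 < PySem.Str.len s))).take r).filter
          (fun s => decide (20 < PySem.Str.len s))) := by
  induction ps with
  | nil => intro tasks r; simp [pvTaskLoop]
  | cons p ps ih =>
    intro tasks r
    rw [pvTaskLoop]
    match r with
    | 0 => simp
    | r + 1 =>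
      simp only [Nat.succ_ne_zero, if_false, Nat.add_sub_cancel, List.map_cons]
      by_cases h10 : 10 < PySem.Str.len (PySem.Str.strip p)
      · rw [if_pos (by simpa using h10), ih,
          List.filter_cons_of_pos (by simpa using h10), List.take_succ_cons]
        by_cases h20 : 20 < PySem.Str.len (PySem.Str.strip p)
        · rw [List.filter_cons_of_pos (by simpa using h20), if_pos (by simpa using h20)]
          simp
        · rw [List.filter_cons_of_neg (by simpa using h20), if_neg (by simpa using h20)]
          simp
      · rw [if_neg (by simpa using h10), ih,
          List.filter_cons_of_neg (by simpa using h10)]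

-- the two sentence filters coincide: len > 10 forces nonemptiness
theorem pv_sentences_eq (chunk : String) :
    pvSentences chunk
    = (((PySem.Str.split? (PySem.Str.replace chunk "\n" ". ") ".").getD []).map PySem.Str.strip).filter
        (fun s => decide (10 < PySem.Str.len s)) := by
  unfold pvSentences
  apply List.filter_congr
  intro s _
  simp
  rintro hl rfl
  simp at hl

theorem pv_tasks_eq (chunk : String) : pvTasksA chunk = pvTasksFor chunk := by
  have key : (PySem.List.slice (pvSentences chunk) none (some 3)).foldl
      (fun tasks sentence => if decide (20 < PySem.Str.len sentence) then tasks ++ [sentence] else tasks) []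
      = pvTaskLoop ((PySem.Str.split? (PySem.Str.replace chunk "\n" ". ") ".").getD []) [] 3 := by
    rw [pv_taskLoop_eq, pv_sentences_eq, PySem.List.slice_to _ (by norm_num),
      show ((3 : Int)).toNat = 3 from rfl, PySem.List.foldl_append_if]
    rw [List.map_id', List.nil_append]
  unfold pvTasksA pvTasksFor
  rw [key]

theorem pv_periods_eq (chunks : List String) :
    pvPeriodsA chunks = pvPeriodsB chunks := by
  unfold pvPeriodsA pvPeriodsB
  refine congrArg PySem.Dict.items ?_
  apply PySem.List.foldl_congr_mem
  intro acc p _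
  show (if !(pvTasksA p.2).isEmpty then acc.insert (p.1 + 1) (pvTasksA p.2) else acc)
    = (if (pvTasksFor p.2).isEmpty then acc else acc.insert (p.1 + 1) (pvTasksFor p.2))
  rw [pv_tasks_eq]
  cases h : (pvTasksFor p.2).isEmpty
  · rw [if_pos (by simp [h]), if_neg (by simp [h])]
  · rw [if_neg (by simp [h]), if_pos (by simp [h])]

theorem pv_main (text : String) : fallback_text_parsing text = fallback_text_parsing_alt text := by
  unfold fallback_text_parsing fallback_text_parsing_alt
  by_cases h : (pvLines text).isEmpty
  · rw [if_pos h, if_pos h]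
  · rw [if_neg h, if_neg h]
    simp only [pv_chunks_eq, pv_fallback_eq, pv_periods_eq]

-- ===== VERDICT (by name: the statement is the Claim_ definition above) =====
theorem fallback_text_parsing_spec : Claim_equal_fallback_text_parsing := by
  intro text _
  show fallback_text_parsing text = fallback_text_parsing_alt text
  exact pv_main text
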